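-- pv_equiv track=rewrite | github.com/Ailysha404/Abschlussaufgabe_BSB | Dienstag_18.02.py | trimming
-- ===== SOURCE A (Python) =====
-- def trimming(scores, trim_val):
--     """Trim sequence and quality list by given trim value.
--     Calculate mean score of kmers and cuts off end if lower value found.
--     """
--     counter = 0
--     summe = 0
--     item_index = 0
--
--     for kmer in scores:
--         counter += 1
--         summe += kmer
--         item_index += 1
--
--         if counter == 3:
--             kmer_mean = summe / 3
--             counter = 0
--             summe = 0
--
--             if kmer_mean < trim_val:
--                 return scores[0:item_index]
--
--     else:
--         return scores
-- ===== SOURCE B (Python) =====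
-- def trimming(scores, trim_val):
--     """Trim sequence and quality list by given trim value.
--     Walk over full windows of 3; cut at the first window whose mean is low.
--     sum(window) < 3*trim_val is an exact integer form of sum/3 < trim_val."""
--     for i in range(0, len(scores) - len(scores) % 3, 3):
--         if sum(scores[i:i+3]) < 3 * trim_val:
--             return scores[:i+3]
--     return scores
-- ===== Notes on version B (the rewrite author's own statement) =====
-- stated objective: simpler
-- what changed: Replaces the running counter/summe/item_index state machine with a direct loop over chunk start indices that slices each 3-window and compares its integer sum against 3*trim_val.
import Mathlib
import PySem

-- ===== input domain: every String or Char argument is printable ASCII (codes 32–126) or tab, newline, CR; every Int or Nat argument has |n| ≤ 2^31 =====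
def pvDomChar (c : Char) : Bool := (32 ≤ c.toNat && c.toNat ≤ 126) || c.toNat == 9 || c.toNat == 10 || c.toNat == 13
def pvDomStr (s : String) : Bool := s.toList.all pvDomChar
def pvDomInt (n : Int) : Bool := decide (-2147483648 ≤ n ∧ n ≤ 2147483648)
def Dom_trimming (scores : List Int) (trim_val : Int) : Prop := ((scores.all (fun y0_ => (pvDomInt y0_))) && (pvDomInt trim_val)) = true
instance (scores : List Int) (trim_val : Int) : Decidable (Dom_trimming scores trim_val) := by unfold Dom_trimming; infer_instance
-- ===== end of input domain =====

-- B replaces A's counter/summe/item_index state machine with a direct loop over 3-chunk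
-- start indices (simpler decomposition); return values proved equal, no side effects.

-- ===== PORT A =====
-- A's `summe / 3 < trim_val` is Python float true division; on domain ints the
-- comparison is exact and equals the integer comparison `summe < 3 * trim_val`,
-- which is how it is ported here.
def trimmingGo (scores : List Int) (trim_val : Int) :
    List Int → Int → Int → Int → List Int
  | [], _, _, _ => scores
  | kmer :: rest, counter, summe, item_index =>
    let counter' := counter + 1
    let summe' := summe + kmer
    let item_index' := item_index + 1
    if counter' == 3 then
      if summe' < 3 * trim_val then
        PySem.List.slice scores (some 0) (some item_index')
      else
        trimmingGo scores trim_val rest 0 0 item_index'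
    else
      trimmingGo scores trim_val rest counter' summe' item_index'

def trimming (scores : List Int) (trim_val : Int) : List Int :=
  trimmingGo scores trim_val scores 0 0 0

-- ===== PORT B =====
-- Source B's loop over start indices 0, 3, 6, … consuming one 3-window per step;
-- `scores[i:i+3]` is the three leading elements of `rest`, `scores[:i+3]` the slice.
def trimmingAltGo (scores : List Int) (trim_val : Int) :
    List Int → Int → List Int
  | a :: b :: c :: rest, i =>
    if a + b + c < 3 * trim_val then
      PySem.List.slice scores (some 0) (some (i + 3))
    else
      trimmingAltGo scores trim_val rest (i + 3)
  | _, _ => scores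

def trimming_alt (scores : List Int) (trim_val : Int) : List Int :=
  trimmingAltGo scores trim_val scores 0

-- ===== PRECONDITION & SPEC =====
def Spec_trimming (scores : List Int) (trim_val : Int) (out : List Int) : Prop := out = trimming_alt scores trim_val
instance (scores : List Int) (trim_val : Int) (out : List Int) : Decidable (Spec_trimming scores trim_val out) := by unfold Spec_trimming; infer_instance

-- ===== CLAIM (what is proved, stated in full; the proofs are below) =====
def Claim_equal_trimming : Prop := ∀ (scores : List Int) (trim_val : Int), Dom_trimming scores trim_val → Spec_trimming scores trim_val (trimming scores trim_val)

-- ===== LEMMAS AND PROOFS =====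
theorem trimmingGo_eq_altGo (scores : List Int) (trim_val : Int) :
    ∀ (rest : List Int) (i : Int),
      trimmingGo scores trim_val rest 0 0 i = trimmingAltGo scores trim_val rest i
  | [], _ => by simp [trimmingGo, trimmingAltGo]
  | [a], _ => by simp [trimmingGo, trimmingAltGo]
  | [a, b], _ => by simp [trimmingGo, trimmingAltGo]
  | a :: b :: c :: rest, i => by
    simp only [trimmingGo, trimmingAltGo]
    have h1 : ((0 : Int) + 1 == 3) = false := by decide
    have h2 : ((0 : Int) + 1 + 1 == 3) = false := by decide
    have h3 : ((0 : Int) + 1 + 1 + 1 == 3) = true := by decide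
    simp only [h1, h2, h3, Bool.false_eq_true, if_false, if_true]
    have hsum : (0 : Int) + a + b + c = a + b + c := by ring
    have hidx : i + 1 + 1 + 1 = i + 3 := by ring
    rw [hsum, hidx]
    split
    · rfl
    · exact trimmingGo_eq_altGo scores trim_val rest (i + 3)

-- ===== VERDICT (by name: the statement is the Claim_ definition above) =====
theorem trimming_spec : Claim_equal_trimming := by
  intro scores trim_val _
  unfold Spec_trimming trimming trimming_alt
  exact trimmingGo_eq_altGo scores trim_val scores 0
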